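-- pv_equiv track=rewrite | github.com/ThanhSangLouis/Pacman_AI_Game | Pacman-AI/Source/Algorithms/Backtracking_ver2.py | simulate_path
-- ===== SOURCE A (Python) =====
-- def simulate_path(start_pos, moves): # Giả lập đường đi từ vị trí bắt đầu đến vị trí hiện tại
--     r, c = start_pos
--     path = [start_pos]
--     for move in moves:
--         dr, dc = move
--         r += dr
--         c += dc
--         path.append((r, c))
--     return path
-- ===== SOURCE B (Python) =====
-- def _prefix(init, deltas):
--     out = [init]
--     for d in deltas:
--         init += d
--         out.append(init)
--     return out
--
-- def simulate_path(start_pos, moves):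
--     rows = _prefix(start_pos[0], [m[0] for m in moves])
--     cols = _prefix(start_pos[1], [m[1] for m in moves])
--     return list(zip(rows, cols))
-- ===== Notes on version B (the rewrite author's own statement) =====
-- stated objective: alternative
-- what changed: B replaces the single stepwise (r,c)-mutation loop by two independent prefix-sum passes over the row deltas and the column deltas, then zips the two cumulative coordinate lists into the path.
import Mathlib
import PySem

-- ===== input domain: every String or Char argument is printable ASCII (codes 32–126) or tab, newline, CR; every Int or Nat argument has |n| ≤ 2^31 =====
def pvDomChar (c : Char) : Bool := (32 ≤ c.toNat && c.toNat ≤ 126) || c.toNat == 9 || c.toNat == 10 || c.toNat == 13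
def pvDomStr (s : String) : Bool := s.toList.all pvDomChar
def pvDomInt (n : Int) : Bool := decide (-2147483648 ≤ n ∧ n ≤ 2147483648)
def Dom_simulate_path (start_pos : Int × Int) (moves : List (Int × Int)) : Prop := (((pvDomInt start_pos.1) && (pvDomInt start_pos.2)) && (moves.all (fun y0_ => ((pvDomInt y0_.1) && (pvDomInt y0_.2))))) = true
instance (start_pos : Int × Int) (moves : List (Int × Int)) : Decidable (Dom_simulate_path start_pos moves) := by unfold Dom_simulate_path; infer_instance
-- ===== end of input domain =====

-- B builds the path as the zip of two independent prefix-sum passes (rows, columns) instead of A's single stepwise (r,c) loop; objective: alternative decomposition.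


-- ===== PORT A =====
-- literal transliteration of A: one loop carrying (r, c, path), appending (r+dr, c+dc) each step
def simulate_path (start_pos : Int × Int) (moves : List (Int × Int)) : List (Int × Int) :=
  let r := start_pos.1
  let c := start_pos.2
  let st := moves.foldl
    (fun (st : Int × Int × List (Int × Int)) move =>
      let r := st.1 + move.1
      let c := st.2.1 + move.2
      (r, c, st.2.2 ++ [(r, c)]))
    (r, c, [start_pos])
  st.2.2

-- ===== PORT B =====
-- _prefix from Source B: cumulative sums starting at init
def pvPrefix (init : Int) (deltas : List Int) : List Int :=
  (deltas.foldl (fun (st : Int × List Int) d => (st.1 + d, st.2 ++ [st.1 + d])) (init, [init])).2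

def simulate_path_alt (start_pos : Int × Int) (moves : List (Int × Int)) : List (Int × Int) :=
  let rows := pvPrefix start_pos.1 (moves.map (fun m => m.1))
  let cols := pvPrefix start_pos.2 (moves.map (fun m => m.2))
  rows.zip cols

-- ===== PRECONDITION & SPEC =====
def Spec_simulate_path (start_pos : Int × Int) (moves : List (Int × Int)) (out : List (Int × Int)) : Prop := out = simulate_path_alt start_pos moves
instance (start_pos : Int × Int) (moves : List (Int × Int)) (out : List (Int × Int)) : Decidable (Spec_simulate_path start_pos moves out) := by unfold Spec_simulate_path; infer_instance

-- ===== CLAIM (what is proved, stated in full; the proofs are below) =====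
def Claim_equal_simulate_path : Prop := ∀ (start_pos : Int × Int) (moves : List (Int × Int)), Dom_simulate_path start_pos moves → Spec_simulate_path start_pos moves (simulate_path start_pos moves)

-- ===== LEMMAS AND PROOFS =====
-- canonical tail of the path: positions reached after each move
def tailScan : Int → Int → List (Int × Int) → List (Int × Int)
  | _, _, [] => []
  | r, c, m :: ms => (r + m.1, c + m.2) :: tailScan (r + m.1) (c + m.2) ms

-- tails of the prefix sums
def pSums : Int → List Int → List Int
  | _, [] => []
  | i, d :: ds => (i + d) :: pSums (i + d) ds

theorem foldA_eq (moves : List (Int × Int)) : ∀ (r c : Int) (p : List (Int × Int)),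
    (moves.foldl
      (fun (st : Int × Int × List (Int × Int)) move =>
        let r := st.1 + move.1
        let c := st.2.1 + move.2
        (r, c, st.2.2 ++ [(r, c)]))
      (r, c, p)).2.2 = p ++ tailScan r c moves := by
  induction moves with
  | nil => intro r c p; simp [tailScan]
  | cons m ms ih =>
    intro r c p
    simp only [List.foldl_cons, tailScan, ih]
    simp

theorem foldP_eq (ds : List Int) : ∀ (i : Int) (q : List Int),
    (ds.foldl (fun (st : Int × List Int) d => (st.1 + d, st.2 ++ [st.1 + d])) (i, q)).2
      = q ++ pSums i ds := by
  induction ds with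
  | nil => intro i q; simp [pSums]
  | cons d ds ih =>
    intro i q
    simp only [List.foldl_cons, pSums, ih]
    simp

theorem pvPrefix_eq (i : Int) (ds : List Int) : pvPrefix i ds = i :: pSums i ds := by
  simp [pvPrefix, foldP_eq]

theorem zip_pSums (moves : List (Int × Int)) : ∀ (r c : Int),
    (pSums r (moves.map (fun m => m.1))).zip (pSums c (moves.map (fun m => m.2)))
      = tailScan r c moves := by
  induction moves with
  | nil => intro r c; simp [pSums, tailScan]
  | cons m ms ih =>
    intro r c
    simp only [List.map_cons, pSums, tailScan, List.zip_cons_cons, ih]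

-- ===== VERDICT (by name: the statement is the Claim_ definition above) =====
theorem simulate_path_spec : Claim_equal_simulate_path := by
  intro start_pos moves _
  unfold Spec_simulate_path simulate_path simulate_path_alt
  simp only [foldA_eq, pvPrefix_eq, List.zip_cons_cons, zip_pSums]
  rfl
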